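-- pv_equiv track=rewrite | github.com/berntpopp/adVNTR | advntr/hmm_utils.py | extract_repeating_segments_from_read
-- ===== SOURCE A (Python) =====
-- def extract_repeating_segments_from_read(sequence, visited_states):
--     repeats = []
--     vpaths = []
--     prev_start = None
--     prev_start_state = None
--     sequence_index = 0
--     for i in range(len(visited_states)):
--         if visited_states[i].startswith('unit_end') and prev_start is not None:
--             repeat = ''
--             vpath = []
--             for j in range(prev_start, sequence_index):
--                 repeat += sequence[j]
--             for j in range(prev_start_state+1, i):
--                 vpath.append(visited_states[j])
--             repeats.append(repeat)
--             vpaths.append(vpath)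
--         if visited_states[i].startswith('unit_start'):
--             prev_start = sequence_index
--             prev_start_state = i
--         if is_emitting_state(visited_states[i]):
--             sequence_index += 1
--     return repeats, vpaths
--
-- def is_emitting_state(state_name):
--     if state_name.startswith('M') or state_name.startswith('I') or state_name.startswith('start_random_matches') \
--             or state_name.startswith('end_random_matches'):
--         return True
--     return False
-- ===== SOURCE B (Python) =====
-- def is_emitting_state(state_name):
--     return state_name.startswith(('M', 'I', 'start_random_matches', 'end_random_matches'))
--
--
-- def extract_repeating_segments_from_read(sequence, visited_states):
--     # prefix table: seq_pos[i] = number of emitting states among visited_states[:i]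
--     seq_pos = [0]
--     count = 0
--     for state in visited_states:
--         if is_emitting_state(state):
--             count += 1
--         seq_pos.append(count)
--     repeats = []
--     vpaths = []
--     last_start = None
--     for i, state in enumerate(visited_states):
--         if state.startswith('unit_end') and last_start is not None:
--             repeats.append(sequence[seq_pos[last_start]:seq_pos[i]])
--             vpaths.append(visited_states[last_start + 1:i])
--         if state.startswith('unit_start'):
--             last_start = i
--     return repeats, vpaths
-- ===== Notes on version B (the rewrite author's own statement) =====
-- stated objective: alternative
-- what changed: Replaces the single pass that threads sequence_index/prev_start and rebuilds each repeat character-by-character with an inner loop by a precomputed prefix table of emitting-state counts plus a pairing pass that extracts each repeat and state path with direct slices.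
import Mathlib
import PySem

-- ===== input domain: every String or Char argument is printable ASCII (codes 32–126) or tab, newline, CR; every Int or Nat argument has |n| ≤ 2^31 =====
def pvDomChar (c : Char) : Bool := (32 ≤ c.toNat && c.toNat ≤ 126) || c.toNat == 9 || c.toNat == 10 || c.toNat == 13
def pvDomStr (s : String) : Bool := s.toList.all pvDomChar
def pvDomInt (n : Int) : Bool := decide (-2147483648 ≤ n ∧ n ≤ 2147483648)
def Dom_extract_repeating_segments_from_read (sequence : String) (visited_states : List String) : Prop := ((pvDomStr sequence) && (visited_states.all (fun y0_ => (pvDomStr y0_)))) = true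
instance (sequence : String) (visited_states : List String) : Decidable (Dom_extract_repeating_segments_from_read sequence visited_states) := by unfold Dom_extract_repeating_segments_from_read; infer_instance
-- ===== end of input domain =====

-- B replaces A's single pass threading sequence_index/prev_start with an inner character loop by a
-- precomputed prefix table of emitting-state counts plus a pairing pass using direct slices (alternative decomposition).

-- ===== PORT A =====
def pvIsEmittingState (s : String) : Bool :=
  if PySem.Str.startswith s "M" || PySem.Str.startswith s "I"
      || PySem.Str.startswith s "start_random_matches"
      || PySem.Str.startswith s "end_random_matches" then true else false

-- one iteration of A's loop body; state = (repeats, vpaths, prev_start, prev_start_state, sequence_index)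
-- sequence[j] is ported with PySem.Str.pyGet? (getD ' ' is unreachable under Pre_, where every j is in range)
def pvStepA (sequence : String) (visited_states : List String)
    (st : List String × List (List String) × Option Nat × Option Nat × Nat) (i : Nat) :
    List String × List (List String) × Option Nat × Option Nat × Nat :=
  match st with
  | (reps, vps, ps, pss, si) =>
    let v := visited_states.getD i ""
    let (reps, vps) :=
      match ps, pss with
      | some p, some pk =>
        if PySem.Str.startswith v "unit_end" then
          let repeatChars := (List.range' p (si - p)).foldl
            (fun r j => r ++ [((PySem.Str.pyGet? sequence (Int.ofNat j)).getD ' ')]) []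
          let vpath := (List.range' (pk + 1) (i - (pk + 1))).foldl
            (fun vp j => vp ++ [visited_states.getD j ""]) []
          (reps ++ [String.ofList repeatChars], vps ++ [vpath])
        else (reps, vps)
      | _, _ => (reps, vps)
    let psp := if PySem.Str.startswith v "unit_start" then (some si, some i) else (ps, pss)
    let si' := if pvIsEmittingState v then si + 1 else si
    (reps, vps, psp.1, psp.2, si')

def extract_repeating_segments_from_read (sequence : String) (visited_states : List String) :
    List String × List (List String) :=
  let st := (List.range visited_states.length).foldl (pvStepA sequence visited_states)
    ([], [], none, none, 0)
  (st.1, st.2.1)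

-- ===== PORT B =====
-- seq_pos tail: running counts of emitting states (Source B's first loop)
def pvSeqPos : List String → Nat → List Nat
  | [], _ => []
  | s :: rest, c =>
    let c' := if pvIsEmittingState s then c + 1 else c
    c' :: pvSeqPos rest c'

-- one iteration of Source B's pairing loop; state = (repeats, vpaths, last_start)
def pvStepB (sequence : String) (visited_states : List String) (seqPos : List Nat)
    (st : List String × List (List String) × Option Int) (p : Int × String) :
    List String × List (List String) × Option Int :=
  match st, p with
  | (reps, vps, last), (i, s) =>
    let (reps, vps) :=
      match last with
      | some k =>
        if PySem.Str.startswith s "unit_end" then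
          (reps ++ [PySem.Str.slice sequence
                      (some ((PySem.List.pyGetD seqPos k 0 : Nat) : Int))
                      (some ((PySem.List.pyGetD seqPos i 0 : Nat) : Int))],
           vps ++ [PySem.List.slice visited_states (some (k + 1)) (some i)])
        else (reps, vps)
      | none => (reps, vps)
    let last' := if PySem.Str.startswith s "unit_start" then some i else last
    (reps, vps, last')

def extract_repeating_segments_from_read_alt (sequence : String) (visited_states : List String) :
    List String × List (List String) :=
  let seqPos := 0 :: pvSeqPos visited_states 0
  let st := (PySem.List.enumerate visited_states 0).foldl
    (pvStepB sequence visited_states seqPos) ([], [], none)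
  (st.1, st.2.1)

-- ===== PRECONDITION & SPEC =====
-- number of emitting states in a list (A's sequence_index after scanning it)
def pvCnt (l : List String) : Nat := l.countP (fun s => pvIsEmittingState s)

-- Pre_ excludes exactly the inputs where A raises IndexError: a unit_end state whose pending repeat
-- region (from the sequence position of the last preceding unit_start) extends past the end of sequence.
def Pre_extract_repeating_segments_from_read (sequence : String) (visited_states : List String) : Prop :=
  ∀ i < visited_states.length, ∀ k < i,
    PySem.Str.startswith (visited_states.getD i "") "unit_end" = true →
    PySem.Str.startswith (visited_states.getD k "") "unit_start" = true →
    (∀ j < i, k < j → PySem.Str.startswith (visited_states.getD j "") "unit_start" = false) →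
    (pvCnt (visited_states.take i) ≤ sequence.toList.length
      ∨ pvCnt (visited_states.take k) = pvCnt (visited_states.take i))

instance (sequence : String) (visited_states : List String) :
    Decidable (Pre_extract_repeating_segments_from_read sequence visited_states) := by
  unfold Pre_extract_repeating_segments_from_read
  exact @Nat.decidableBallLT _ _ (fun i _ => @Nat.decidableBallLT _ _ (fun k _ => inferInstance))

def pvWitness_extract_repeating_segments_from_read : String × List String :=
  ("AC", ["unit_start", "M1", "I2", "unit_end"])

def Spec_extract_repeating_segments_from_read (sequence : String) (visited_states : List String)
    (out : List String × List (List String)) : Prop :=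
  out = extract_repeating_segments_from_read_alt sequence visited_states

instance (sequence : String) (visited_states : List String) (out : List String × List (List String)) :
    Decidable (Spec_extract_repeating_segments_from_read sequence visited_states out) := by
  unfold Spec_extract_repeating_segments_from_read; infer_instance

-- ===== CLAIM (what is proved, stated in full; the proofs are below) =====
def Claim_equal_extract_repeating_segments_from_read : Prop :=
  ∀ (sequence : String) (visited_states : List String),
    Dom_extract_repeating_segments_from_read sequence visited_states →
    Pre_extract_repeating_segments_from_read sequence visited_states →
    Spec_extract_repeating_segments_from_read sequence visited_states
      (extract_repeating_segments_from_read sequence visited_states)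

-- ===== LEMMAS AND PROOFS =====

lemma pv_cnt_append_singleton (pre : List String) (s : String) :
    pvCnt (pre ++ [s]) = pvCnt pre + (if pvIsEmittingState s then 1 else 0) := by
  simp [pvCnt, List.countP_append, List.countP_cons]

lemma pv_cnt_take_mono (l : List String) {k i : Nat} (h : k ≤ i) :
    pvCnt (l.take k) ≤ pvCnt (l.take i) := by
  have hpre : (l.take k) <+: (l.take i) := by
    have : List.take k (List.take i l) = List.take k l := by
      rw [List.take_take]; congr 1; omega
    exact this ▸ List.take_prefix k (l.take i)
  exact hpre.sublist.countP_le

lemma pv_seqPos_getD (l : List String) :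
    ∀ (c m : Nat), m ≤ l.length → (c :: pvSeqPos l c).getD m 0 = c + pvCnt (l.take m) := by
  induction l with
  | nil =>
    intro c m hm
    have : m = 0 := by simpa using hm
    subst this; simp [pvCnt]
  | cons s r ih =>
    intro c m hm
    cases m with
    | zero => simp [pvCnt]
    | succ m' =>
      have h := ih (if pvIsEmittingState s then c + 1 else c) m' (by simpa using hm)
      simp only [pvSeqPos, List.getD_cons_succ] at h ⊢
      rw [h]
      simp only [pvCnt, List.take_succ_cons, List.countP_cons]
      cases hE : pvIsEmittingState s <;> simp [hE] <;> omega

lemma pv_map_range'_getD {α : Type} (d : α) (l : List α) :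
    ∀ (c p : Nat), p + c ≤ l.length →
      (List.range' p c).map (fun j => l.getD j d) = (l.drop p).take c := by
  intro c
  induction c with
  | zero => simp
  | succ c' ih =>
    intro p h
    have hp : p < l.length := by omega
    rw [List.range'_succ, List.map_cons, ih (p+1) (by omega)]
    rw [List.getD_eq_getElem l d hp]
    rw [← List.getElem_cons_drop hp, List.take_succ_cons]

lemma pv_getD_append_cons {α : Type} [Inhabited α] (pre : List α) (s : α) (r : List α) (d : α) :
    (pre ++ s :: r).getD pre.length d = s := by
  simp [List.getD_eq_getElem?_getD]

lemma pv_main (seq : String) (states : List String)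
    (hP : Pre_extract_repeating_segments_from_read seq states) :
    ∀ (rest pre : List String) (reps : List String) (vps : List (List String)) (kopt : Option Nat),
      states = pre ++ rest →
      (∀ k, kopt = some k → k < pre.length ∧
          PySem.Str.startswith (states.getD k "") "unit_start" = true ∧
          ∀ j, j < pre.length → k < j → PySem.Str.startswith (states.getD j "") "unit_start" = false) →
      (let ra := (List.range' pre.length rest.length).foldl (pvStepA seq states)
          (reps, vps, kopt.map (fun k => pvCnt (states.take k)), kopt, pvCnt pre);
       let rb := (PySem.List.enumerate rest (pre.length : Int)).foldl
          (pvStepB seq states (0 :: pvSeqPos states 0))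
          (reps, vps, kopt.map (fun k => (k : Int)));
       (ra.1, ra.2.1) = (rb.1, rb.2.1)) := by
  intro rest
  induction rest with
  | nil =>
    intro pre reps vps kopt hst hinv
    simp [PySem.List.enumerate]
  | cons s rest' ih =>
    intro pre reps vps kopt hst hinv
    have htake : states.take pre.length = pre := by
      rw [hst]; exact List.take_left
    have hgd : states.getD pre.length "" = s := by
      rw [hst]; exact pv_getD_append_cons pre s rest' ""
    have hgdN := hgd; simp only [List.getD_eq_getElem?_getD] at hgdN
    have hlen : states.length = pre.length + rest'.length + 1 := by
      rw [hst]; simp; omega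
    have hcnt' : (if pvIsEmittingState s then pvCnt pre + 1 else pvCnt pre)
        = pvCnt (pre ++ [s]) := by
      rw [pv_cnt_append_singleton]; cases pvIsEmittingState s <;> simp
    simp only [List.length_cons, List.range'_succ, PySem.List.enumerate_cons, List.foldl_cons]
    -- the new prefix for the IH
    have hst' : states = (pre ++ [s]) ++ rest' := by simpa using hst
    rcases kopt with _ | k
    · -- no unit_start seen yet: neither side appends
      by_cases hU : PySem.Str.startswith s "unit_start" = true
      · have hUN := hU; simp at hUN
        have h2 := ih (pre ++ [s]) reps vps (some pre.length) hst'
          (by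
            intro k hk; cases hk
            refine ⟨by simp, by rw [hgd]; exact hU, ?_⟩
            intro j hj hj'; simp at hj; omega)
        simp only [List.length_append, List.length_cons, List.length_nil] at h2
        simpa [pvStepA, pvStepB, hgdN, hUN, htake, hcnt', Nat.add_comm, Int.natCast_add] using h2
      · have hUN := hU; simp at hUN
        have h2 := ih (pre ++ [s]) reps vps none hst' (by intro k hk; cases hk)
        simp only [List.length_append, List.length_cons, List.length_nil] at h2
        simpa [pvStepA, pvStepB, hgdN, hUN, hcnt', Nat.add_comm, Int.natCast_add] using h2
    · -- a unit_start at index k is pending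
      obtain ⟨hk, hks, hnb⟩ := hinv k rfl
      by_cases hE : PySem.Str.startswith s "unit_end" = true
      · have hEN := hE; simp at hEN
        -- both sides append a repeat and a vpath; show the appended values agree
        have hiLt : pre.length < states.length := by omega
        have hpre : pvCnt (states.take k) ≤ pvCnt pre := by
          rw [← htake]; exact pv_cnt_take_mono states (le_of_lt hk)
        have hc := hP pre.length hiLt k hk (by rw [hgd]; exact hE) hks
          (by intro j hj hkj; exact hnb j hj hkj)
        rw [htake] at hc
        -- the repeat string
        have hrep : String.ofList ((List.range' (pvCnt (states.take k))
              (pvCnt pre - pvCnt (states.take k))).foldl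
              (fun r j => r ++ [((PySem.Str.pyGet? seq (Int.ofNat j)).getD ' ')]) [])
            = PySem.Str.slice seq
                (some ((PySem.List.pyGetD (0 :: pvSeqPos states 0) (k : Int) 0 : Nat) : Int))
                (some ((PySem.List.pyGetD (0 :: pvSeqPos states 0) (pre.length : Int) 0 : Nat) : Int)) := by
          have e1 : PySem.List.pyGetD (0 :: pvSeqPos states 0) (k : Int) 0 = pvCnt (states.take k) := by
            rw [PySem.List.pyGetD_natCast]
            simpa using pv_seqPos_getD states 0 k (by omega)
          have e2 : PySem.List.pyGetD (0 :: pvSeqPos states 0) (pre.length : Int) 0 = pvCnt pre := by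
            rw [PySem.List.pyGetD_natCast]
            have := pv_seqPos_getD states 0 pre.length (by omega)
            rw [htake] at this; simpa using this
          rw [e1, e2]
          have hfun : (fun (r : List Char) (j : Nat) =>
                r ++ [((PySem.Str.pyGet? seq (Int.ofNat j)).getD ' ')])
              = (fun r j => r ++ [seq.toList.getD j ' ']) := by
            funext r j; simp [List.getD_eq_getElem?_getD]
          rw [hfun, PySem.List.foldl_append_singleton_eq_map, List.nil_append]
          rw [show PySem.Str.slice seq (some ((pvCnt (states.take k) : Nat) : Int))
                (some ((pvCnt pre : Nat) : Int))
              = String.ofList ((seq.toList.drop (pvCnt (states.take k))).take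
                  (pvCnt pre - pvCnt (states.take k))) by
            simp [PySem.Str.slice, PySem.List.slice_natCast]]
          rcases hc with hc | hc
          · rw [pv_map_range'_getD ' ' seq.toList _ _ (by omega)]
          · rw [hc]; simp
        -- the vpath
        have hvp : (List.range' (k + 1) (pre.length - (k + 1))).foldl
              (fun vp j => vp ++ [states.getD j ""]) []
            = PySem.List.slice states (some ((k : Int) + 1)) (some (pre.length : Int)) := by
          rw [PySem.List.foldl_append_singleton_eq_map]
          rw [show ((k : Int) + 1) = ((k + 1 : Nat) : Int) by push_cast; ring]
          rw [PySem.List.slice_natCast]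
          simp only [List.nil_append]
          exact pv_map_range'_getD "" states _ _ (by omega)
        have hrepN := hrep; simp at hrepN
        have hvpN := hvp; simp at hvpN
        by_cases hU : PySem.Str.startswith s "unit_start" = true
        · have hUN := hU; simp at hUN
          have h2 := ih (pre ++ [s]) (reps ++ [String.ofList ((List.range' (pvCnt (states.take k))
                (pvCnt pre - pvCnt (states.take k))).foldl
                (fun r j => r ++ [((PySem.Str.pyGet? seq (Int.ofNat j)).getD ' ')]) [])])
            (vps ++ [(List.range' (k + 1) (pre.length - (k + 1))).foldl
                (fun vp j => vp ++ [states.getD j ""]) []]) (some pre.length) hst'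
            (by
              intro k' hk'; cases hk'
              refine ⟨by simp, by rw [hgd]; exact hU, ?_⟩
              intro j hj hj'; simp at hj; omega)
          simp only [List.length_append, List.length_cons, List.length_nil] at h2
          simpa [pvStepA, pvStepB, hgdN, hUN, hEN, htake, hcnt', hrepN, hvpN,
            Nat.add_comm, Int.natCast_add] using h2
        · have hUN := hU; simp at hUN
          have h2 := ih (pre ++ [s]) (reps ++ [String.ofList ((List.range' (pvCnt (states.take k))
                (pvCnt pre - pvCnt (states.take k))).foldl
                (fun r j => r ++ [((PySem.Str.pyGet? seq (Int.ofNat j)).getD ' ')]) [])])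
            (vps ++ [(List.range' (k + 1) (pre.length - (k + 1))).foldl
                (fun vp j => vp ++ [states.getD j ""]) []]) (some k) hst'
            (by
              intro k' hk'; cases hk'
              refine ⟨by simp; omega, hks, ?_⟩
              intro j hj hj'
              simp only [List.length_append, List.length_cons, List.length_nil] at hj
              rcases Nat.lt_or_ge j pre.length with hj2 | hj2
              · exact hnb j hj2 hj'
              · have : j = pre.length := by omega
                subst this; rw [hgd]; simpa using hU)
          simp only [List.length_append, List.length_cons, List.length_nil] at h2
          simpa [pvStepA, pvStepB, hgdN, hUN, hEN, htake, hcnt', hrepN, hvpN,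
            Nat.add_comm, Int.natCast_add] using h2
      · have hEN := hE; simp at hEN
        by_cases hU : PySem.Str.startswith s "unit_start" = true
        · have hUN := hU; simp at hUN
          have h2 := ih (pre ++ [s]) reps vps (some pre.length) hst'
            (by
              intro k' hk'; cases hk'
              refine ⟨by simp, by rw [hgd]; exact hU, ?_⟩
              intro j hj hj'; simp at hj; omega)
          simp only [List.length_append, List.length_cons, List.length_nil] at h2
          simpa [pvStepA, pvStepB, hgdN, hUN, hEN, htake, hcnt', Nat.add_comm, Int.natCast_add] using h2
        · have hUN := hU; simp at hUN
          have h2 := ih (pre ++ [s]) reps vps (some k) hst'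
            (by
              intro k' hk'; cases hk'
              refine ⟨by simp; omega, hks, ?_⟩
              intro j hj hj'
              simp only [List.length_append, List.length_cons, List.length_nil] at hj
              rcases Nat.lt_or_ge j pre.length with hj2 | hj2
              · exact hnb j hj2 hj'
              · have : j = pre.length := by omega
                subst this; rw [hgd]; simpa using hU)
          simp only [List.length_append, List.length_cons, List.length_nil] at h2
          simpa [pvStepA, pvStepB, hgdN, hUN, hEN, htake, hcnt', Nat.add_comm, Int.natCast_add] using h2

-- ===== VERDICT (by name: the statement is the Claim_ definition above) =====
theorem extract_repeating_segments_from_read_spec : Claim_equal_extract_repeating_segments_from_read := by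
  intro seq states _ hP
  unfold Spec_extract_repeating_segments_from_read
  have h := pv_main seq states hP states [] [] [] none rfl (by intro k hk; cases hk)
  simpa [extract_repeating_segments_from_read, extract_repeating_segments_from_read_alt,
    List.range_eq_range', pvCnt, Prod.ext_iff] using h
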